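-- pv_equiv track=rewrite | github.com/AgileRE-2022/UserPersonaToUserStory | coba pos tagging.py | Noun
-- ===== SOURCE A (Python) =====
-- def Noun(teks):
--     try:
--         for token in teks:
--             for token2 in teks:
--                 if "NN" in token2:
--                     indeks = token2.index("NN")
--                     hasil = []
--                     while(indeks<len(token2)):
--                         b = token[indeks]
--                         hasil.append(b)
--                         indeks = indeks+1
--                     return(" ".join([str(item) for item in hasil]))
--     except ValueError:
--         return("[ERROR DETECTED: Format not supported]")
-- ===== SOURCE B (Python) =====
-- def Noun(teks):
--     # One pass: the first sublist containing "NN" determines the slice of teks[0] to join.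
--     for token2 in teks:
--         if "NN" in token2:
--             i = token2.index("NN")
--             return " ".join(teks[0][i:len(token2)])
--     return None
-- ===== Notes on version B (the rewrite author's own statement) =====
-- stated objective: faster
-- what changed: A's redundant nested double loop plus an index-by-index while/append over token is replaced by one pass that finds the first 'NN'-containing sublist and joins a builtin slice of teks[0]; the dead try/except ValueError is dropped.
import Mathlib
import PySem

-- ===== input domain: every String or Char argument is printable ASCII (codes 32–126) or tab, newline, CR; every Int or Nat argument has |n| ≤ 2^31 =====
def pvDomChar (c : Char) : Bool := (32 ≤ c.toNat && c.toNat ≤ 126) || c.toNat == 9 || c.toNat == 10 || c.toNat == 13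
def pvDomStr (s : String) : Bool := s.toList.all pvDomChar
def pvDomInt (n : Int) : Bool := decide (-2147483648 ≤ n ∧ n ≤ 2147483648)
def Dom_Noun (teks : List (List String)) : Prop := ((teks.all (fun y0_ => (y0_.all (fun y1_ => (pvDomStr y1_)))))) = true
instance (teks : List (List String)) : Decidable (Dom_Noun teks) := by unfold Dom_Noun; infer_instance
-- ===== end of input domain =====

-- B replaces A's nested double loop + element-by-element while/append with one pass and a slice/join; same return value on Pre_ (A's dead ValueError handler is unreachable).

-- ===== PORT A =====
-- the while loop: hasil accumulates token[indeks] for indeks in [i, len2); none = IndexError (outside Pre_)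
def pvWhileA (token : List String) (len2 indeks : Nat) (hasil : List String) : Option (List String) :=
  if indeks < len2 then
    match PySem.List.pyGet? token (indeks : Int) with
    | none => none
    | some b => pvWhileA token len2 (indeks + 1) (hasil ++ [b])
  else some hasil
termination_by len2 - indeks

-- inner 'for token2 in teks' loop; none = fell through (continue outer); some r = 'return r' (with r = none marking IndexError, outside Pre_)
def pvInnerA (token : List String) : List (List String) → Option (Option String)
  | [] => none
  | token2 :: rest =>
    if "NN" ∈ token2 then
      match PySem.List.index? token2 "NN" with
      | some indeks =>
        match pvWhileA token token2.length indeks [] with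
        | some hasil => some (some (PySem.Str.join " " hasil))
        | none => some none
      | none => some (some "[ERROR DETECTED: Format not supported]")  -- except ValueError (unreachable after the membership test)
    else pvInnerA token rest

-- outer 'for token in teks' loop
def pvOuterA (teks : List (List String)) : List (List String) → Option String
  | [] => none
  | token :: rest =>
    match pvInnerA token teks with
    | some r => r
    | none => pvOuterA teks rest

def Noun (teks : List (List String)) : Option String := pvOuterA teks teks

-- ===== PORT B =====
def pvScanB (teks : List (List String)) : List (List String) → Option String
  | [] => none
  | token2 :: rest =>
    if "NN" ∈ token2 then
      match PySem.List.pyGet? teks (0 : Int), PySem.List.index? token2 "NN" with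
      | some token, some i =>
          some (PySem.Str.join " " (PySem.List.slice token (some (i : Int)) (some (token2.length : Int))))
      | _, _ => none
    else pvScanB teks rest

def Noun_alt (teks : List (List String)) : Option String := pvScanB teks teks

-- ===== PRECONDITION & SPEC =====
-- Pre_ excludes exactly the inputs where A raises IndexError: those whose first "NN"-containing sublist is longer than teks[0].
def Pre_Noun (teks : List (List String)) : Prop :=
  ((teks.find? (fun t => decide ("NN" ∈ t))).all
    (fun t2 => decide (t2.length ≤ (teks.headD []).length))) = true
instance (teks : List (List String)) : Decidable (Pre_Noun teks) := by unfold Pre_Noun; infer_instance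
def pvWitness_Noun : List (List String) := [["NN", "x"]]

def Spec_Noun (teks : List (List String)) (out : Option String) : Prop := out = Noun_alt teks
instance (teks : List (List String)) (out : Option String) : Decidable (Spec_Noun teks out) := by unfold Spec_Noun; infer_instance

-- ===== CLAIM (what is proved, stated in full; the proofs are below) =====
def Claim_equal_Noun : Prop := ∀ (teks : List (List String)), Dom_Noun teks → Pre_Noun teks → Spec_Noun teks (Noun teks)

-- ===== LEMMAS AND PROOFS =====

theorem pvWhileA_ok (token : List String) (len2 : Nat) (hlen : len2 ≤ token.length) :
    ∀ i acc, pvWhileA token len2 i acc = some (acc ++ (token.take len2).drop i) := by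
  intro i
  induction' hfi : len2 - i using Nat.strong_induction_on with k ih generalizing i
  subst hfi
  intro acc
  rw [pvWhileA]
  by_cases h : i < len2
  · have hi : i < token.length := lt_of_lt_of_le h hlen
    have hget : PySem.List.pyGet? token (i : Int) = token[i]? := by
      simp [PySem.List.pyGet?_natCast]
    simp only [h, if_true, hget, List.getElem?_eq_getElem hi]
    rw [ih (len2 - (i + 1)) (by omega) (i + 1) rfl]
    have hdrop : (token.take len2).drop i = token[i] :: (token.take len2).drop (i + 1) := by
      rw [List.drop_eq_getElem_cons (by simp; omega)]
      congr 1
      simp [List.getElem_take]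
    rw [hdrop]
    simp
  · simp only [h, if_false]
    have : (token.take len2).drop i = [] := by
      apply List.drop_eq_nil_of_le
      simp; omega
    simp [this]

theorem noNN_inner (token : List String) :
    ∀ l : List (List String), (∀ t ∈ l, "NN" ∉ t) → pvInnerA token l = none := by
  intro l
  induction l with
  | nil => intro _; rfl
  | cons t2 rest ih =>
    intro h
    rw [pvInnerA]
    simp only [h t2 (by simp), if_false]
    exact ih (fun t ht => h t (by simp [ht]))

theorem noNN_scan (teks : List (List String)) :
    ∀ l : List (List String), (∀ t ∈ l, "NN" ∉ t) → pvScanB teks l = none := by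
  intro l
  induction l with
  | nil => intro _; rfl
  | cons t2 rest ih =>
    intro h
    rw [pvScanB]
    simp only [h t2 (by simp), if_false]
    exact ih (fun t ht => h t (by simp [ht]))

theorem outerA_none (teks : List (List String)) (h : ∀ token, pvInnerA token teks = none) :
    ∀ l, pvOuterA teks l = none := by
  intro l
  induction l with
  | nil => rfl
  | cons token rest ih => rw [pvOuterA, h token]; exact ih

theorem scan_agree (teks : List (List String)) (token : List String)
    (hget : PySem.List.pyGet? teks (0 : Int) = some token) :
    ∀ (l : List (List String)) (t2 : List String),
      l.find? (fun t => decide ("NN" ∈ t)) = some t2 → t2.length ≤ token.length →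
      ∃ r, pvInnerA token l = some r ∧ pvScanB teks l = r := by
  intro l
  induction l with
  | nil => intro t2 h; simp at h
  | cons a rest ih =>
    intro t2 hfind hle
    by_cases hmem : "NN" ∈ a
    · have ht2 : t2 = a := by
        simp [hmem] at hfind
        exact hfind.symm
      subst ht2
      have hsome : (PySem.List.index? t2 "NN").isSome := by
        rw [PySem.List.index?_isSome_iff]; exact hmem
      obtain ⟨i, hi⟩ := Option.isSome_iff_exists.mp hsome
      obtain ⟨hik, hv, _⟩ := PySem.List.getElem_of_index?_eq_some hi
      rw [pvInnerA, pvScanB]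
      simp only [hmem, if_true, hi, hget]
      rw [pvWhileA_ok token t2.length hle i []]
      refine ⟨_, rfl, ?_⟩
      congr 1
      rw [PySem.List.slice_natCast]
      rw [List.drop_take]
      simp
    · rw [pvInnerA, pvScanB]
      simp only [hmem, if_false]
      simp only [List.find?_cons, hmem, decide_false] at hfind
      exact ih t2 hfind hle

-- ===== VERDICT (by name: the statement is the Claim_ definition above) =====
theorem Noun_spec : Claim_equal_Noun := by
  intro teks _hdom hpre
  unfold Spec_Noun Noun Noun_alt
  cases hfind : teks.find? (fun t => decide ("NN" ∈ t)) with
  | none =>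
    have hno : ∀ t ∈ teks, "NN" ∉ t := by
      intro t ht hc
      have := List.find?_eq_none.mp hfind t ht
      simp [hc] at this
    rw [outerA_none teks (fun token => noNN_inner token teks hno) teks,
        noNN_scan teks teks hno]
  | some t2 =>
    cases teks with
    | nil => simp at hfind
    | cons token rest =>
      have hle : t2.length ≤ token.length := by
        unfold Pre_Noun at hpre
        simp [hfind] at hpre
        simpa using hpre
      have hget : PySem.List.pyGet? (token :: rest) (0 : Int) = some token := by
        simp [PySem.List.pyGet?, PySem.List.pyIdx?]
      obtain ⟨r, hA, hB⟩ := scan_agree (token :: rest) token hget (token :: rest) t2 hfind hle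
      rw [pvOuterA, hA, hB]
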